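-- pv_equiv track=rewrite | github.com/dhruvvvijay/ROAR_PY | roar_py_interface/actors/actor.py | __propose_name_and_modify_list
-- ===== SOURCE A (Python) =====
-- def __propose_name_and_modify_list(list_of_names: list, new_name: str, counter: int = 0):
--     if counter < 1:
--         if new_name + "_1" in list_of_names:
--             return __propose_name_and_modify_list(list_of_names, new_name, 2)
--         else:
--             list_of_names.pop(list_of_names.index(new_name))
--             list_of_names.append(new_name + "_1")
--             return __propose_name_and_modify_list(list_of_names, new_name, 2)
--     else:
--         actual_name = new_name + "_" + str(counter)
--         if actual_name in list_of_names:
--             return __propose_name_and_modify_list(list_of_names, new_name, counter + 1)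
--         else:
--             return actual_name
-- ===== SOURCE B (Python) =====
-- def __propose_name_and_modify_list(list_of_names: list, new_name: str, counter: int = 0):
--     if counter < 1:
--         if new_name + "_1" not in list_of_names:
--             list_of_names.pop(list_of_names.index(new_name))
--             list_of_names.append(new_name + "_1")
--         i = 2
--     else:
--         i = counter
--     while new_name + "_" + str(i) in list_of_names:
--         i += 1
--     return new_name + "_" + str(i)
-- ===== Notes on version B (the rewrite author's own statement) =====
-- stated objective: idiomatic
-- what changed: Replaced A's self-recursion (with a special dispatch case re-entered on every call) by a flat decomposition: one upfront mutation step that fixes the start index, then an explicit while-loop scanning upward for the first free numbered name.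
import Mathlib
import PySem

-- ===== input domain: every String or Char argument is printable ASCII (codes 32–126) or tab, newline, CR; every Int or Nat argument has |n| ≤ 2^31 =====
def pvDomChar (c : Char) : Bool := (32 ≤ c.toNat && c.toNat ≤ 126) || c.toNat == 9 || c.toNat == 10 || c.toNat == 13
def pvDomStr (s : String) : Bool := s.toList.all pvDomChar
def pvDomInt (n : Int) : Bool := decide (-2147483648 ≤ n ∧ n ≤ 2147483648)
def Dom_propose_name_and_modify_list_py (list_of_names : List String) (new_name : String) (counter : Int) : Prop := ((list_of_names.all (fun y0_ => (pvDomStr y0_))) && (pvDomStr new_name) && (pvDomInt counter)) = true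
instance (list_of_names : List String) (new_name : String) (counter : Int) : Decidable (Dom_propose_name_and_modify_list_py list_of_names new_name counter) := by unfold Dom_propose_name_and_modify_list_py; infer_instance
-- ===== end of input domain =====

-- B replaces A's tail recursion by a flat decomposition: one mutation step, then an explicit
-- counting scan (objective: simpler/idiomatic). Both Pythons mutate list_of_names identically
-- (pop+append); the equivalence proved here is about the RETURN value only.

-- ===== PORT A =====
-- A's single self-recursive function. `fuel` is a totality guard for the scan steps only
-- (fuel = length + 1 can never run out: the candidates are pairwise distinct strings, so at
-- most `length` consecutive candidates can be members); the counter<1 dispatch step does not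
-- consume fuel — it decreases the lexicographic second component instead.
-- list_of_names.pop(list_of_names.index(new_name)) removes the first occurrence of new_name:
-- exact as (PySem.List.remove? …); the .getD fallback is reached only where Python raises
-- ValueError (new_name absent), which Pre_ excludes.
def pvPropA (fuel : Nat) (list_of_names : List String) (new_name : String) (counter : Int) : String :=
  if counter < 1 then
    if (new_name ++ "_1") ∈ list_of_names then
      pvPropA fuel list_of_names new_name 2
    else
      pvPropA fuel (((PySem.List.remove? list_of_names new_name).getD list_of_names) ++ [new_name ++ "_1"]) new_name 2
  else
    let actual_name := new_name ++ "_" ++ PySem.Int.toStr counter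
    if actual_name ∈ list_of_names then
      match fuel with
      | 0 => ""
      | f + 1 => pvPropA f list_of_names new_name (counter + 1)
    else actual_name
termination_by (fuel, if counter < 1 then 1 else 0)
decreasing_by
  all_goals first
    | (apply Prod.Lex.left; omega)
    | (apply Prod.Lex.right; simp_all)

def propose_name_and_modify_list_py (list_of_names : List String) (new_name : String) (counter : Int) : String :=
  pvPropA (list_of_names.length + 1) list_of_names new_name counter

-- ===== PORT B =====
-- Source B's while-loop: scan upward from i for the first free numbered name (same fuel guard).
def pvFindFree (fuel : Nat) (list_of_names : List String) (new_name : String) (i : Int) : String :=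
  if (new_name ++ "_" ++ PySem.Int.toStr i) ∈ list_of_names then
    match fuel with
    | 0 => ""
    | f + 1 => pvFindFree f list_of_names new_name (i + 1)
  else new_name ++ "_" ++ PySem.Int.toStr i

def propose_name_and_modify_list_py_alt (list_of_names : List String) (new_name : String) (counter : Int) : String :=
  let l' := if counter < 1 ∧ (new_name ++ "_1") ∉ list_of_names then
      ((PySem.List.remove? list_of_names new_name).getD list_of_names) ++ [new_name ++ "_1"]
    else list_of_names
  let i : Int := if counter < 1 then 2 else counter
  pvFindFree (l'.length + 1) l' new_name i

-- ===== PRECONDITION & SPEC =====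
-- Pre_ excludes exactly the inputs where Python A raises ValueError: counter < 1 with neither
-- new_name + "_1" nor new_name itself in the list (list.index fails). B raises there too.
def Pre_propose_name_and_modify_list_py (list_of_names : List String) (new_name : String) (counter : Int) : Prop :=
  counter < 1 → ((new_name ++ "_1") ∈ list_of_names ∨ new_name ∈ list_of_names)
instance (list_of_names : List String) (new_name : String) (counter : Int) : Decidable (Pre_propose_name_and_modify_list_py list_of_names new_name counter) := by unfold Pre_propose_name_and_modify_list_py; infer_instance

def pvWitness_propose_name_and_modify_list_py : List String × String × Int := (["a"], "a", 0)

def Spec_propose_name_and_modify_list_py (list_of_names : List String) (new_name : String) (counter : Int) (out : String) : Prop := out = propose_name_and_modify_list_py_alt list_of_names new_name counter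
instance (list_of_names : List String) (new_name : String) (counter : Int) (out : String) : Decidable (Spec_propose_name_and_modify_list_py list_of_names new_name counter out) := by unfold Spec_propose_name_and_modify_list_py; infer_instance

-- ===== CLAIM (what is proved, stated in full; the proofs are below) =====
def Claim_equal_propose_name_and_modify_list_py : Prop := ∀ (list_of_names : List String) (new_name : String) (counter : Int), Dom_propose_name_and_modify_list_py list_of_names new_name counter → Pre_propose_name_and_modify_list_py list_of_names new_name counter → Spec_propose_name_and_modify_list_py list_of_names new_name counter (propose_name_and_modify_list_py list_of_names new_name counter)

-- ===== LEMMAS AND PROOFS =====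

-- A's counter ≥ 1 phase is exactly B's scan, fuel for fuel.
theorem pvPropA_scan (fuel : Nat) : ∀ (l : List String) (n : String) (c : Int), ¬ c < 1 →
    pvPropA fuel l n c = pvFindFree fuel l n c := by
  induction fuel with
  | zero =>
      intro l n c hc
      rw [pvPropA, pvFindFree]
      simp [hc]
  | succ f ih =>
      intro l n c hc
      rw [pvPropA, pvFindFree]
      simp only [if_neg hc]
      split
      · exact ih l n (c + 1) (by omega)
      · rfl

theorem pvWitness_ok :
    Dom_propose_name_and_modify_list_py pvWitness_propose_name_and_modify_list_py.1
      pvWitness_propose_name_and_modify_list_py.2.1 pvWitness_propose_name_and_modify_list_py.2.2 ∧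
    Pre_propose_name_and_modify_list_py pvWitness_propose_name_and_modify_list_py.1
      pvWitness_propose_name_and_modify_list_py.2.1 pvWitness_propose_name_and_modify_list_py.2.2 := by
  decide

-- ===== VERDICT (by name: the statement is the Claim_ definition above) =====
theorem propose_name_and_modify_list_py_spec : Claim_equal_propose_name_and_modify_list_py := by
  intro l n c _ hpre
  unfold Spec_propose_name_and_modify_list_py propose_name_and_modify_list_py propose_name_and_modify_list_py_alt
  by_cases hc : c < 1
  · by_cases hm : (n ++ "_1") ∈ l
    · rw [pvPropA]
      simp only [if_pos hc, if_pos hm]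
      rw [if_neg (fun h => h.2 hm)]
      exact pvPropA_scan _ l n 2 (by omega)
    · have hn : n ∈ l := (hpre hc).resolve_left hm
      rw [pvPropA]
      simp only [if_pos hc, if_neg hm]
      have hrem : PySem.List.remove? l n = some (l.erase n) := PySem.List.remove?_eq_some_erase l n hn
      have hlen : (((PySem.List.remove? l n).getD l) ++ [n ++ "_1"]).length = l.length := by
        have hpos := List.length_pos_of_mem hn
        rw [hrem]
        simp [hn]
        omega
      rw [if_pos ⟨hc, hm⟩]
      simp only [hlen]
      exact pvPropA_scan _ _ n 2 (by omega)
  · have hcond : (if c < 1 ∧ (n ++ "_1") ∉ l then ((PySem.List.remove? l n).getD l) ++ [n ++ "_1"] else l) = l := by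
      simp [hc]
    rw [hcond]
    simp only [if_neg hc]
    exact pvPropA_scan _ l n c hc
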